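-- pv_equiv track=rewrite | github.com/psifertex/translation-plugin | translation_core.py | strip_programming_prefix
-- ===== SOURCE A (Python) =====
-- PROGRAMMING_PREFIXES = [
--     # Objective-C/Swift
--     'sel_',           # Selector
--     'ivar_',          # Instance variable
--     'iVarName_',      # Instance variable name
--     'clsName_',       # Class name
--     'cls_',           # Class
--     'prop_',          # Property
--     'method_',        # Method
--     'proto_',         # Protocol
--     'cat_',           # Category
--
--     # C/C++
--     'vtable_',        # Virtual table
--     'vptr_',          # Virtual pointer
--     'ctor_',          # Constructor
--     'dtor_',          # Destructor
--     'lpfn_',          # Long pointer to function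
--     'pfn_',           # Pointer to function
--     'cb_',            # Callback
--     'lp_',            # Long pointer
--     'p_',             # Pointer
--     'pp_',            # Pointer to pointer
--     'rg_',            # Range/array
--     'c_',             # Count
--     'n_',             # Number
--     'sz_',            # Zero-terminated string
--     'str_',           # String
--     'psz_',           # Pointer to zero-terminated string
--     'wsz_',           # Wide string zero-terminated
--
--     # Windows/COM
--     'IID_',           # Interface ID
--     'CLSID_',         # Class ID
--     'GUID_',          # Global unique ID
--     'uuid_',          # Universal unique ID
--     'riid_',          # Reference to interface ID
--     'rclsid_',        # Reference to class ID
--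
--     # Python
--     '__pyx_',         # Cython
--     '__py_',          # Python internal
--     '_Py_',           # Python C API
--
--     # Go
--     'go_',            # Go runtime
--     'runtime_',       # Runtime functions
--
--     # Rust
--     'rs_',            # Rust
--     '_ZN',            # Rust mangled name start
--
--     # General
--     'fn_',            # Function
--     'func_',          # Function
--     'sub_',           # Subroutine
--     'loc_',           # Location
--     'var_',           # Variable
--     'arg_',           # Argument
--     'param_',         # Parameter
--     'ret_',           # Return value
--     'tmp_',           # Temporary
--     'temp_',          # Temporary
--     'local_',         # Local variable
--     'global_',        # Global variable
--     'static_',        # Static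
--     'const_',         # Constant
--     'enum_',          # Enumeration
--     'struct_',        # Structure
--     'union_',         # Union
--     'type_',          # Type
--     'typedef_',       # Type definition
--     'ns_',            # Namespace
--     'mod_',           # Module
-- ]
--
-- def strip_programming_prefix(text):
--     """Remove common programming prefixes for language detection/translation"""
--     if not text:
--         return text
--
--     text_lower = text.lower()
--     for prefix in PROGRAMMING_PREFIXES:
--         if text_lower.startswith(prefix.lower()):
--             return text[len(prefix):]
--
--     return text
-- ===== SOURCE B (Python) =====
-- PROGRAMMING_PREFIXES = [
--     'sel_', 'ivar_', 'iVarName_', 'clsName_', 'cls_', 'prop_', 'method_',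
--     'proto_', 'cat_',
--     'vtable_', 'vptr_', 'ctor_', 'dtor_', 'lpfn_', 'pfn_', 'cb_', 'lp_',
--     'p_', 'pp_', 'rg_', 'c_', 'n_', 'sz_', 'str_', 'psz_', 'wsz_',
--     'IID_', 'CLSID_', 'GUID_', 'uuid_', 'riid_', 'rclsid_',
--     '__pyx_', '__py_', '_Py_',
--     'go_', 'runtime_',
--     'rs_', '_ZN',
--     'fn_', 'func_', 'sub_', 'loc_', 'var_', 'arg_', 'param_', 'ret_',
--     'tmp_', 'temp_', 'local_', 'global_', 'static_', 'const_', 'enum_',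
--     'struct_', 'union_', 'type_', 'typedef_', 'ns_', 'mod_',
-- ]
--
-- # Index the prefixes once by their (lowercased) first character: only the
-- # bucket matching the text's first character can ever match, and keeping the
-- # original list order inside each bucket preserves first-match semantics.
-- _BUCKETS = {}
-- for _p in PROGRAMMING_PREFIXES:
--     _BUCKETS.setdefault(_p[0].lower(), []).append(_p)
--
--
-- def strip_programming_prefix(text):
--     """Remove common programming prefixes for language detection/translation"""
--     if not text:
--         return text
--
--     text_lower = text.lower()
--     for prefix in _BUCKETS.get(text_lower[0], []):
--         if text_lower.startswith(prefix.lower()):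
--             return text[len(prefix):]
--
--     return text
-- ===== Notes on version B (the rewrite author's own statement) =====
-- stated objective: alternative
-- what changed: B replaces A's linear scan over all 60 prefixes by a dict built once that buckets the prefixes by lowercased first character, so only the single bucket matching the text's first character is scanned (order inside the bucket preserves A's first-match-in-list-order).
import Mathlib
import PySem

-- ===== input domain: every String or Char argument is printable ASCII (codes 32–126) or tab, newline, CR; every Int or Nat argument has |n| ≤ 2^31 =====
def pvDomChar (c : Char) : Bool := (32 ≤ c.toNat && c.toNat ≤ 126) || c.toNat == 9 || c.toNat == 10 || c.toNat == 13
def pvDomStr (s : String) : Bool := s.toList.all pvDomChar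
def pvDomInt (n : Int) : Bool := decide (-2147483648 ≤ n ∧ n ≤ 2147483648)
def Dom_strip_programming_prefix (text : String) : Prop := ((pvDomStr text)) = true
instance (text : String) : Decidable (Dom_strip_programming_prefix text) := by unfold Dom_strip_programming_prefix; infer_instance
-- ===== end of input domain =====

-- B replaces A's scan over all 60 prefixes by a first-character bucket index built once; same results.

-- ===== PORT A =====
def pvPrefixes : List String := [
  "sel_",
  "ivar_",
  "iVarName_",
  "clsName_",
  "cls_",
  "prop_",
  "method_",
  "proto_",
  "cat_",
  "vtable_",
  "vptr_",
  "ctor_",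
  "dtor_",
  "lpfn_",
  "pfn_",
  "cb_",
  "lp_",
  "p_",
  "pp_",
  "rg_",
  "c_",
  "n_",
  "sz_",
  "str_",
  "psz_",
  "wsz_",
  "IID_",
  "CLSID_",
  "GUID_",
  "uuid_",
  "riid_",
  "rclsid_",
  "__pyx_",
  "__py_",
  "_Py_",
  "go_",
  "runtime_",
  "rs_",
  "_ZN",
  "fn_",
  "func_",
  "sub_",
  "loc_",
  "var_",
  "arg_",
  "param_",
  "ret_",
  "tmp_",
  "temp_",
  "local_",
  "global_",
  "static_",
  "const_",
  "enum_",
  "struct_",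
  "union_",
  "type_",
  "typedef_",
  "ns_",
  "mod_"
]

-- A's inner loop: first prefix (in list order) whose lowercase is a prefix of
-- text_lower wins; returns text[len(prefix):].
def stripGoA (text : String) (tl : List Char) : List String → String
  | [] => text
  | p :: ps =>
    if PySem.Chars.startswith tl (PySem.Chars.lower p.toList) then
      PySem.Str.slice text (some (p.toList.length : Int)) none
    else stripGoA text tl ps

def strip_programming_prefix (text : String) : String :=
  if text.toList = [] then text
  else stripGoA text (PySem.Str.lower text).toList pvPrefixes

-- ===== PORT B =====
-- _p[0].lower() in Source B; every prefix is nonempty so headD's default is never used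
def pvKey (p : String) : Char := PySem.Chars.lowerChar (p.toList.headD ' ')

-- the _BUCKETS dict of Source B, built once: setdefault(key, []) then append
def pvBuckets : PySem.Dict Char (List String) :=
  pvPrefixes.foldl (fun d p => d.insert (pvKey p) (d.getD (pvKey p) [] ++ [p])) PySem.Dict.empty

-- Source B's inner loop over one bucket (textually the same loop as A's)
def stripGoB (text : String) (tl : List Char) : List String → String
  | [] => text
  | p :: ps =>
    if PySem.Chars.startswith tl (PySem.Chars.lower p.toList) then
      PySem.Str.slice text (some (p.toList.length : Int)) none
    else stripGoB text tl ps

def strip_programming_prefix_alt (text : String) : String :=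
  if text.toList = [] then text
  else
    let tl := (PySem.Str.lower text).toList
    -- text_lower[0]: tl is nonempty here, so headD's default is never used
    stripGoB text tl (pvBuckets.getD (tl.headD ' ') [])

-- ===== PRECONDITION & SPEC =====
def Spec_strip_programming_prefix (text : String) (out : String) : Prop := out = strip_programming_prefix_alt text
instance (text : String) (out : String) : Decidable (Spec_strip_programming_prefix text out) := by unfold Spec_strip_programming_prefix; infer_instance

-- ===== CLAIM (what is proved, stated in full; the proofs are below) =====
def Claim_equal_strip_programming_prefix : Prop := ∀ (text : String), Dom_strip_programming_prefix text → Spec_strip_programming_prefix text (strip_programming_prefix text)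

-- ===== LEMMAS AND PROOFS =====

-- the two (textually identical) inner loops compute the same function
theorem stripGoB_eq_goA (text : String) (tl : List Char) (L : List String) :
    stripGoB text tl L = stripGoA text tl L := by
  induction L with
  | nil => rfl
  | cons p ps ih => simp [stripGoA, stripGoB, ih]

-- buckets built by foldl = filter by key
theorem buckets_getD (L : List String) (d : PySem.Dict Char (List String)) (c : Char) :
    (L.foldl (fun d p => d.insert (pvKey p) (d.getD (pvKey p) [] ++ [p])) d).getD c []
      = d.getD c [] ++ L.filter (fun p => pvKey p == c) := by
  induction L generalizing d with
  | nil => simp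
  | cons p ps ih =>
      simp only [List.foldl_cons, ih, List.filter_cons, PySem.Dict.getD_insert]
      by_cases h : pvKey p = c
      · simp [h]
      · simp [h, Ne.symm h]

-- a prefix whose key differs from the text's first (lowered) character cannot match
theorem go_filter (text : String) (t : Char) (ts : List Char) (L : List String)
    (hne : ∀ p ∈ L, p.toList ≠ []) :
    stripGoA text (PySem.Chars.lower (t :: ts)) L
      = stripGoA text (PySem.Chars.lower (t :: ts))
          (L.filter (fun p => pvKey p == PySem.Chars.lowerChar t)) := by
  induction L with
  | nil => rfl
  | cons p ps ih =>
      have hp : p.toList ≠ [] := hne p (by simp)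
      have hps : ∀ q ∈ ps, q.toList ≠ [] := fun q hq => hne q (by simp [hq])
      by_cases hk : pvKey p = PySem.Chars.lowerChar t
      · simp only [List.filter_cons, hk, beq_self_eq_true, if_true, stripGoA]
        split
        · rfl
        · exact ih hps
      · have hmiss : PySem.Chars.startswith (PySem.Chars.lower (t :: ts))
            (PySem.Chars.lower p.toList) = false := by
          rw [Bool.eq_false_iff]
          intro hsw
          obtain ⟨q, qs, hq⟩ : ∃ q qs, p.toList = q :: qs := by
            cases hpl : p.toList with
            | nil => exact absurd hpl hp
            | cons q qs => exact ⟨q, qs, rfl⟩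
          rw [PySem.Chars.startswith_iff] at hsw
          rw [hq] at hsw
          simp only [PySem.Chars.lower, List.map_cons] at hsw
          have hhead := (List.cons_prefix_cons.mp hsw).1
          apply hk
          simp [pvKey, hq, hhead]
        simp only [List.filter_cons, beq_iff_eq, hk, if_false, stripGoA, hmiss,
          Bool.false_eq_true]
        exact ih hps
      
-- every prefix in the table is nonempty
theorem pvPrefixes_ne_nil : ∀ p ∈ pvPrefixes, p.toList ≠ [] := by decide

-- ===== VERDICT (by name: the statement is the Claim_ definition above) =====
theorem strip_programming_prefix_spec : Claim_equal_strip_programming_prefix := by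
  intro text _
  unfold Spec_strip_programming_prefix strip_programming_prefix strip_programming_prefix_alt
  cases htl : text.toList with
  | nil => simp
  | cons t ts =>
      simp only [reduceCtorEq, if_false]
      rw [stripGoB_eq_goA, pvBuckets, buckets_getD, PySem.Dict.getD_empty, List.nil_append]
      have hlow : (PySem.Str.lower text).toList = PySem.Chars.lower (t :: ts) := by
        rw [PySem.Str.toList_lower, htl]
      have hhd : (PySem.Chars.lower (t :: ts)).headD ' ' = PySem.Chars.lowerChar t := by
        simp [PySem.Chars.lower]
      rw [hlow, hhd]
      exact go_filter text t ts pvPrefixes pvPrefixes_ne_nil
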